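-- pv_equiv track=rewrite | github.com/sjarmak/CodeContextBench | scripts/evaluation/oracle_drift_check.py | _resolve_repo
-- ===== SOURCE A (Python) =====
-- from typing import Optional
--
-- def _resolve_repo(gt_slug: str, repos: dict) -> Optional[dict]:
--     """Resolve a GT repo slug to a Dockerfile repo entry.
--
--     Handles mismatches like:
--       GT 'kubernetes-client-go' → Dockerfile 'client-go'
--       GT 'stylo'                → Dockerfile 'servo' (via sub-match)
--       GT 'prometheus'           → Dockerfile 'prometheus'
--
--     Uses scored matching: longer matches win to avoid ambiguity.
--     """
--     # Exact match (highest priority)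
--     if gt_slug in repos:
--         return repos[gt_slug]
--
--     # Score-based fuzzy matching: prefer longest matching slug
--     candidates = []
--     for slug, info in repos.items():
--         score = 0
--         if slug == gt_slug:
--             score = 1000  # exact
--         elif gt_slug.endswith(f"-{slug}"):
--             # kubernetes-client-go ends with -client-go → matches client-go
--             score = 100 + len(slug)
--         elif gt_slug.startswith(f"{slug}-"):
--             score = 90 + len(slug)
--         elif slug.startswith(gt_slug) or gt_slug.startswith(slug):
--             score = 50 + min(len(slug), len(gt_slug))
--         elif slug in gt_slug:
--             score = 30 + len(slug)
--         elif gt_slug in slug: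
--             score = 20 + len(gt_slug)
--
--         if score > 0:
--             candidates.append((score, info))
--
--     if candidates:
--         candidates.sort(key=lambda x: x[0], reverse=True)
--         return candidates[0][1]
--
--     return None
-- ===== SOURCE B (Python) =====
-- from typing import Optional
--
--
-- def _score(gt_slug: str, slug: str) -> int:
--     """Score how well Dockerfile slug matches GT slug (0 = no match)."""
--     if slug == gt_slug:
--         return 1000
--     if gt_slug.endswith("-" + slug):
--         return 100 + len(slug)
--     if gt_slug.startswith(slug + "-"):
--         return 90 + len(slug)
--     if slug.startswith(gt_slug) or gt_slug.startswith(slug):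
--         return 50 + min(len(slug), len(gt_slug))
--     if slug in gt_slug:
--         return 30 + len(slug)
--     if gt_slug in slug:
--         return 20 + len(gt_slug)
--     return 0
--
--
-- def _resolve_repo(gt_slug: str, repos: dict) -> Optional[dict]:
--     if gt_slug in repos:
--         return repos[gt_slug]
--     best_score = 0
--     best_info = None
--     for slug, info in repos.items():
--         s = _score(gt_slug, slug)
--         if s > best_score:  # strict: first-inserted repo wins ties, like the stable sort
--             best_score, best_info = s, info
--     return best_info
-- ===== Notes on version B (the rewrite author's own statement) =====
-- stated objective: simpler
-- what changed: The elif cascade is factored into a _score helper and the collect-candidates/stable-descending-sort/take-head phase is replaced by a single running strict-maximum pass (no candidate list, no sort), with strict '>' preserving the first-inserted tie winner.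
import Mathlib
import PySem

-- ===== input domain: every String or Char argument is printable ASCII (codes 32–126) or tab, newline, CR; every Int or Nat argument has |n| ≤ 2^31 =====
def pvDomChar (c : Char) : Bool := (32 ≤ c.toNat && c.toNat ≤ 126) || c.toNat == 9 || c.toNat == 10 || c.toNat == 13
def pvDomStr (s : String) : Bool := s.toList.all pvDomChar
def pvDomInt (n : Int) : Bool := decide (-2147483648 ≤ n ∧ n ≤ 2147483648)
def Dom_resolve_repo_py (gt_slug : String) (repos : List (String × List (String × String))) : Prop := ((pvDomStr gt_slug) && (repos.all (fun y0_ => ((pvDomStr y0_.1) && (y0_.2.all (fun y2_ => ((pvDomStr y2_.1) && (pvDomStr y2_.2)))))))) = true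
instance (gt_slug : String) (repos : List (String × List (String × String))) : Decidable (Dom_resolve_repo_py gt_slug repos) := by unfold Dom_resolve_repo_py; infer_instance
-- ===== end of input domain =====

-- B replaces A's collect-then-stable-sort-then-head phase by a single running strict-maximum
-- pass with the score cascade factored into a helper (objective: simpler).

-- ===== PORT A =====
-- literal port of _resolve_repo: exact-match early return, candidate list with the inline
-- score cascade (string concatenation f"-{slug}" rendered on List Char), stable descending
-- sort by score, first candidate.
def resolve_repo_py (gt_slug : String) (repos : List (String × List (String × String))) : Option (List (String × String)) :=
  match PySem.Dict.get? ⟨repos⟩ gt_slug with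
  | some info => some info
  | none =>
    let candidates : List (Int × List (String × String)) :=
      repos.foldl (fun acc p =>
        let score : Int :=
          if p.1.toList = gt_slug.toList then 1000
          else if PySem.Chars.endswith gt_slug.toList ('-' :: p.1.toList) then 100 + (p.1.toList.length : Int)
          else if PySem.Chars.startswith gt_slug.toList (p.1.toList ++ ['-']) then 90 + (p.1.toList.length : Int)
          else if PySem.Chars.startswith p.1.toList gt_slug.toList || PySem.Chars.startswith gt_slug.toList p.1.toList then
            50 + min (p.1.toList.length : Int) (gt_slug.toList.length : Int)
          else if PySem.Chars.isIn p.1.toList gt_slug.toList then 30 + (p.1.toList.length : Int)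
          else if PySem.Chars.isIn gt_slug.toList p.1.toList then 20 + (gt_slug.toList.length : Int)
          else 0
        if score > 0 then acc ++ [(score, p.2)] else acc) []
    match PySem.List.sorted candidates (fun x => x.1) true with
    | [] => none
    | c :: _ => some c.2

-- ===== PORT B =====
-- B's scoring helper (_score in Source B)
def pvScore (gt_slug slug : List Char) : Int :=
  if slug = gt_slug then 1000
  else if PySem.Chars.endswith gt_slug ('-' :: slug) then 100 + (slug.length : Int)
  else if PySem.Chars.startswith gt_slug (slug ++ ['-']) then 90 + (slug.length : Int)
  else if PySem.Chars.startswith slug gt_slug || PySem.Chars.startswith gt_slug slug then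
    50 + min (slug.length : Int) (gt_slug.length : Int)
  else if PySem.Chars.isIn slug gt_slug then 30 + (slug.length : Int)
  else if PySem.Chars.isIn gt_slug slug then 20 + (gt_slug.length : Int)
  else 0

def resolve_repo_py_alt (gt_slug : String) (repos : List (String × List (String × String))) : Option (List (String × String)) :=
  match PySem.Dict.get? ⟨repos⟩ gt_slug with
  | some info => some info
  | none =>
    (repos.foldl (fun (b : Int × Option (List (String × String))) p =>
        let s := pvScore gt_slug.toList p.1.toList
        if s > b.1 then (s, some p.2) else b) ((0 : Int), none)).2

-- ===== PRECONDITION & SPEC =====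
def Spec_resolve_repo_py (gt_slug : String) (repos : List (String × List (String × String))) (out : Option (List (String × String))) : Prop := out = resolve_repo_py_alt gt_slug repos
instance (gt_slug : String) (repos : List (String × List (String × String))) (out : Option (List (String × String))) : Decidable (Spec_resolve_repo_py gt_slug repos out) := by unfold Spec_resolve_repo_py; infer_instance

-- ===== CLAIM (what is proved, stated in full; the proofs are below) =====
def Claim_equal_resolve_repo_py : Prop := ∀ (gt_slug : String) (repos : List (String × List (String × String))), Dom_resolve_repo_py gt_slug repos → Spec_resolve_repo_py gt_slug repos (resolve_repo_py gt_slug repos)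

-- ===== LEMMAS AND PROOFS =====

-- B's running best as a function of the head of the stable descending sort of A's candidates
def pvHeadRel (o : Option (Int × List (String × String))) : Int × Option (List (String × String)) :=
  match o with
  | none => (0, none)
  | some c => (c.1, some c.2)

lemma pv_match_head (l : List (Int × List (String × String))) :
    (match l with
     | [] => (none : Option (List (String × String)))
     | c :: _ => some c.2) = (pvHeadRel l.head?).2 := by
  cases l <;> rfl

lemma pv_insertBy_head (x : Int × List (String × String)) (l : List (Int × List (String × String))) :
    (PySem.List.insertBy (fun a b => decide (b.1 < a.1)) x l).head? =
      match l.head? with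
      | none => some x
      | some h => if h.1 < x.1 then some x else some h := by
  cases l with
  | nil => rfl
  | cons h t =>
    simp only [PySem.List.insertBy, List.head?_cons]
    by_cases hlt : h.1 < x.1 <;> simp [hlt]

lemma pv_sorted_append_singleton (acc : List (Int × List (String × String))) (x : Int × List (String × String)) :
    PySem.List.sorted (acc ++ [x]) (fun c => c.1) true =
      PySem.List.insertBy (fun a b => decide (b.1 < a.1)) x (PySem.List.sorted acc (fun c => c.1) true) := by
  rw [PySem.List.sorted_rev_eq_foldl_insertBy, PySem.List.sorted_rev_eq_foldl_insertBy, List.foldl_append]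
  rfl

lemma pv_loop (gt : List Char) :
    ∀ (rs : List (String × List (String × String))) (acc : List (Int × List (String × String)))
      (b : Int × Option (List (String × String))),
      (∀ c ∈ acc, 0 < c.1) →
      b = pvHeadRel ((PySem.List.sorted acc (fun c => c.1) true).head?) →
      rs.foldl (fun b p =>
          if pvScore gt p.1.toList > b.1 then (pvScore gt p.1.toList, some p.2) else b) b
        = pvHeadRel ((PySem.List.sorted
            (rs.foldl (fun acc p =>
              if pvScore gt p.1.toList > 0 then acc ++ [(pvScore gt p.1.toList, p.2)] else acc) acc)
            (fun c => c.1) true).head?) := by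
  intro rs
  induction rs with
  | nil => intro acc b _ hb; simpa using hb
  | cons p rest ih =>
    intro acc b hpos hb
    simp only [List.foldl_cons]
    by_cases hpos' : pvScore gt p.1.toList > 0
    · -- candidate appended; B updates exactly when the score beats the head score
      have hstep : (if pvScore gt p.1.toList > b.1 then (pvScore gt p.1.toList, some p.2) else b)
          = pvHeadRel ((PySem.List.sorted (acc ++ [(pvScore gt p.1.toList, p.2)]) (fun c => c.1) true).head?) := by
        rw [pv_sorted_append_singleton, pv_insertBy_head]
        cases hh : (PySem.List.sorted acc (fun c => c.1) true).head? with
        | none => simp [hb, pvHeadRel, hh, hpos']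
        | some m =>
          simp only [hb, pvHeadRel, hh]
          by_cases hlt : m.1 < pvScore gt p.1.toList <;> simp [hlt, gt_iff_lt]
      rw [if_pos hpos', hstep]
      refine ih _ _ (fun c hc => ?_) rfl
      rcases List.mem_append.mp hc with h | h
      · exact hpos c h
      · simp only [List.mem_singleton] at h; subst h; exact hpos'
    · -- score ≤ 0: A skips the candidate; B cannot update since its best is ≥ 0
      have hb1 : 0 ≤ b.1 := by
        cases hh : (PySem.List.sorted acc (fun c => c.1) true).head? with
        | none => simp [hb, pvHeadRel, hh]
        | some m =>
          have h1 : m ∈ PySem.List.sorted acc (fun c => c.1) true := by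
            apply List.mem_of_mem_head?; rw [hh]; rfl
          have hmem : m ∈ acc := (PySem.List.mem_sorted _ _ _ _).mp h1
          have := hpos m hmem
          simp [hb, pvHeadRel, hh]; omega
      have hnoup : ¬ pvScore gt p.1.toList > b.1 := by omega
      rw [if_neg hpos', if_neg hnoup]
      exact ih acc b hpos hb

-- ===== VERDICT (by name: the statement is the Claim_ definition above) =====
theorem resolve_repo_py_spec : Claim_equal_resolve_repo_py := by
  intro gt_slug repos _
  unfold Spec_resolve_repo_py resolve_repo_py resolve_repo_py_alt
  cases hd : PySem.Dict.get? ⟨repos⟩ gt_slug with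
  | some info => rfl
  | none =>
    show (match PySem.List.sorted
            (repos.foldl (fun acc p =>
              if pvScore gt_slug.toList p.1.toList > 0 then acc ++ [(pvScore gt_slug.toList p.1.toList, p.2)] else acc) [])
            (fun c => c.1) true with
          | [] => (none : Option (List (String × String)))
          | c :: _ => some c.2)
        = (repos.foldl (fun (b : Int × Option (List (String × String))) p =>
            if pvScore gt_slug.toList p.1.toList > b.1 then (pvScore gt_slug.toList p.1.toList, some p.2) else b)
            ((0 : Int), none)).2
    rw [pv_loop gt_slug.toList repos [] ((0 : Int), none) (by simp) rfl]
    exact pv_match_head _
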